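-- pv_equiv track=rewrite | github.com/dcaustin33/poker | Poker.py | flush_sort
-- ===== SOURCE A (Python) =====
-- def flush_sort(hand, board): #insertion sort descending by number and suit after already sorting by suit using .sort
--     new = board + hand
--     new.sort()#strings so sorts according to the first character then have to sort by number
--     for element in range(1, len(new)): #insertion sort
--         j = element - 1
--         while (j >= 0 and int(new[j + 1][1:]) > int(new[j][1:])) and new[j + 1][0] == new[j][0]:
--             first = new[j + 1]
--             second = new[j]
--             new[j] = first
--             new [j + 1] = second
--             j -= 1
--     return new
-- ===== SOURCE B (Python) =====
-- def flush_sort(hand, board):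
--     cards = board + hand
--     if len(cards) < 2:
--         return cards  # already sorted; nothing to compare
--     return sorted(cards, key=lambda c: (c[0], -int(c[1:]), c))
-- ===== Notes on version B (the rewrite author's own statement) =====
-- stated objective: simpler
-- what changed: Replaces A's two-phase routine (lexicographic list.sort followed by a guarded adjacent-swap insertion-sort repair pass) by a single library sort with the composite key (suit character, negated rank, card string), plus a trivial early return for lists of fewer than two cards.
import Mathlib
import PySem

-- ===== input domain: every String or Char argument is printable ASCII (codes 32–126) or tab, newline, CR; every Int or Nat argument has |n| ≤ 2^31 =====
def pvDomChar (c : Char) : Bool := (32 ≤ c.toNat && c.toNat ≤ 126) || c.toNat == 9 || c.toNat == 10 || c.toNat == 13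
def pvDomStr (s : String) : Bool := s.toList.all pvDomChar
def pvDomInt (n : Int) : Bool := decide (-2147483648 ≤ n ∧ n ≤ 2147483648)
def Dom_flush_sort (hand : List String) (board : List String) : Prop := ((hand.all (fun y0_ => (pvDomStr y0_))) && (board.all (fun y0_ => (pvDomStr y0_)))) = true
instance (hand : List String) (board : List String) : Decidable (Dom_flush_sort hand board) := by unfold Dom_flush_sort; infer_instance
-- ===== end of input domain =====

-- B replaces A's two-phase routine (lexicographic sort + guarded adjacent-swap insertion repair)
-- by one library sort keyed on (suit char, -rank, card string); equivalence is about the return value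
-- (A also mutates no caller-visible data: it sorts a fresh concatenation).


-- ===== PORT A =====
-- int(c[1:]) — shared by both sources verbatim; default 0 only reached outside Pre_
def pvRank (c : String) : Int := (PySem.Int.ofStr? (PySem.Str.slice c (some 1) none)).getD 0

-- the inner 'while' loop of A: adjacent swaps moving new[j+1] left
def pvBubble (new : List String) (j : Int) : List String :=
  if h : 0 ≤ j ∧ pvRank (PySem.List.pyGetD new (j+1) "") > pvRank (PySem.List.pyGetD new j "") ∧
         (PySem.Str.pyGet? (PySem.List.pyGetD new (j+1) "") 0 == PySem.Str.pyGet? (PySem.List.pyGetD new j "") 0) = true then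
    let first := PySem.List.pyGetD new (j+1) ""
    let second := PySem.List.pyGetD new j ""
    let new1 := PySem.List.pySetD new j first
    let new2 := PySem.List.pySetD new1 (j+1) second
    pvBubble new2 (j-1)
  else new
termination_by (j+1).toNat
decreasing_by omega

def flush_sort (hand : List String) (board : List String) : List String :=
  let new := PySem.List.sorted (board ++ hand) (fun s => s) false
  (PySem.List.pyRange 1 (PySem.List.len new) 1).foldl (fun cur element => pvBubble cur (element - 1)) new

-- ===== PORT B =====
def pvSuit (c : String) : Char := (PySem.Str.pyGet? c 0).getD (Char.ofNat 0)

-- key=lambda c: (c[0], -int(c[1:]), c) — the 3-tuple as a left-nested lexicographic product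
def pvKey (c : String) : (Char ×ₗ Int) ×ₗ String := toLex (toLex (pvSuit c, -(pvRank c)), c)

def flush_sort_alt (hand : List String) (board : List String) : List String :=
  let cards := board ++ hand
  if cards.length < 2 then cards
  else PySem.List.sorted cards pvKey false

-- ===== PRECONDITION & SPEC =====
-- Pre_ excludes exactly the inputs on which A raises ValueError: two or more cards with some
-- card whose rank part c[1:] is not a valid int literal (with ≤ 1 cards A parses nothing).
def Pre_flush_sort (hand : List String) (board : List String) : Prop :=
  (board ++ hand).length ≤ 1 ∨
    ∀ s ∈ board ++ hand, (PySem.Int.ofStr? (PySem.Str.slice s (some 1) none)).isSome = true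
instance (hand : List String) (board : List String) : Decidable (Pre_flush_sort hand board) := by
  unfold Pre_flush_sort; infer_instance
def pvWitness_flush_sort : List String × List String := (["h10", "s2"], ["d3"])

def Spec_flush_sort (hand : List String) (board : List String) (out : List String) : Prop := out = flush_sort_alt hand board
instance (hand : List String) (board : List String) (out : List String) : Decidable (Spec_flush_sort hand board out) := by unfold Spec_flush_sort; infer_instance

-- ===== CLAIM (what is proved, stated in full; the proofs are below) =====
def Claim_equal_flush_sort : Prop := ∀ (hand : List String) (board : List String), Dom_flush_sort hand board → Pre_flush_sort hand board → Spec_flush_sort hand board (flush_sort hand board)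

-- ===== LEMMAS AND PROOFS =====

-- the guard of A's while loop, as a proposition on the two adjacent cards
abbrev pvGuard (x a : String) : Prop :=
  pvRank a < pvRank x ∧ (PySem.Str.pyGet? x 0 == PySem.Str.pyGet? a 0) = true


-- functional form of the inner while loop: insert x into the reversed processed prefix
def pvIns (x : String) : List String → List String
  | [] => [x]
  | a :: rL => if pvGuard x a then a :: pvIns x rL else x :: a :: rL

lemma pvIns_length (x : String) (rL : List String) : (pvIns x rL).length = rL.length + 1 := by
  induction rL with
  | nil => rfl
  | cons a rL ih => simp only [pvIns]; split <;> simp [ih]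

lemma pvIns_perm (x : String) (rL : List String) : (pvIns x rL).Perm (x :: rL) := by
  induction rL with
  | nil => exact List.Perm.refl _
  | cons a rL ih =>
    simp only [pvIns]; split
    · exact (ih.cons a).trans (List.Perm.swap x a rL)
    · exact List.Perm.refl _

lemma pvIns_mem {b x : String} {rL : List String} (h : b ∈ pvIns x rL) : b = x ∨ b ∈ rL := by
  have := (pvIns_perm x rL).mem_iff.mp h
  simpa using this

lemma getD_append_length (L R : List String) (a d : String) :
    (L ++ a :: R).getD L.length d = a := by
  simp [List.getD_eq_getElem?_getD]

lemma set_append_length (L R : List String) (a v : String) :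
    (L ++ a :: R).set L.length v = L ++ v :: R := by
  simp

-- one unfolding of pvBubble at j = rL.length - 1 on rL.reverse ++ b :: R
lemma pvBubble_eq_pvIns : ∀ (rL : List String) (b : String) (R : List String),
    pvBubble (rL.reverse ++ b :: R) ((rL.length : Int) - 1) = (pvIns b rL).reverse ++ R := by
  intro rL
  induction rL with
  | nil =>
    intro b R
    rw [pvBubble]
    simp [pvIns]
  | cons a rL ih =>
    intro b R
    have hL : (a :: rL).reverse ++ b :: R = rL.reverse ++ a :: (b :: R) := by simp
    have hj : ((a :: rL).length : Int) - 1 = ((rL.length : Nat) : Int) := by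
      push_cast [List.length_cons]; ring
    have hj1 : ((rL.length : Nat) : Int) + 1 = (((rL.length + 1 : Nat)) : Int) := by push_cast; ring
    have hget0 : PySem.List.pyGetD (rL.reverse ++ a :: (b :: R)) ((rL.length : Nat) : Int) "" = a := by
      rw [PySem.List.pyGetD_natCast]
      have : rL.length = rL.reverse.length := by simp
      rw [this, getD_append_length]
    have hget1 : PySem.List.pyGetD (rL.reverse ++ a :: (b :: R)) (((rL.length : Nat) : Int) + 1) "" = b := by
      rw [hj1, PySem.List.pyGetD_natCast]
      have h2 : rL.reverse ++ a :: (b :: R) = (rL.reverse ++ [a]) ++ b :: R := by simp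
      have h3 : rL.length + 1 = (rL.reverse ++ [a]).length := by simp
      rw [h2, h3, getD_append_length]
    rw [hL, hj, pvBubble]
    by_cases hg : pvGuard b a
    · rw [dif_pos]
      · have hset1 : PySem.List.pySetD (rL.reverse ++ a :: (b :: R)) ((rL.length : Nat) : Int)
            (PySem.List.pyGetD (rL.reverse ++ a :: (b :: R)) (((rL.length : Nat) : Int) + 1) "") = rL.reverse ++ b :: (b :: R) := by
          rw [hget1, PySem.List.pySetD_natCast]
          have : rL.length = rL.reverse.length := by simp
          rw [this, set_append_length]
        have hset2 : PySem.List.pySetD (rL.reverse ++ b :: (b :: R)) (((rL.length : Nat) : Int) + 1)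
            (PySem.List.pyGetD (rL.reverse ++ a :: (b :: R)) ((rL.length : Nat) : Int) "") = rL.reverse ++ b :: (a :: R) := by
          rw [hget0, hj1, PySem.List.pySetD_natCast]
          have h2 : rL.reverse ++ b :: (b :: R) = (rL.reverse ++ [b]) ++ b :: R := by simp
          have h3 : rL.length + 1 = (rL.reverse ++ [b]).length := by simp
          rw [h2, h3, set_append_length]
          simp
        simp only [hset1, hset2]
        have := ih b (a :: R)
        have harg : ((rL.length : Nat) : Int) - 1 = ((rL.length : Nat) : Int) - 1 := rfl
        rw [this]
        simp only [pvIns]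
        rw [if_pos hg]
        simp
      · refine ⟨by positivity, ?_, ?_⟩
        · rw [hget0, hget1]; exact hg.1
        · rw [hget0, hget1]; exact hg.2
    · rw [dif_neg]
      · simp only [pvIns]
        rw [if_neg hg]
        simp
      · rw [hget0, hget1]
        intro hc
        exact hg ⟨hc.2.1, hc.2.2⟩

-- the outer for loop as a fold of pvIns steps
lemma pvLoop_eq_fold : ∀ (rest acc : List String), acc ≠ [] →
    (PySem.List.pyRange (acc.length : Int) ((acc.length : Int) + rest.length) 1).foldl
      (fun cur element => pvBubble cur (element - 1)) (acc ++ rest)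
    = rest.foldl (fun ac x => (pvIns x ac.reverse).reverse) acc := by
  intro rest
  induction rest with
  | nil =>
    intro acc hacc
    have : PySem.List.pyRange (acc.length : Int) ((acc.length : Int) + ([] : List String).length) 1 = [] := by
      simp [PySem.List.pyRange]
    rw [this]
    simp
  | cons x rest ih =>
    intro acc hacc
    have hlt : (acc.length : Int) < (acc.length : Int) + (x :: rest).length := by
      push_cast [List.length_cons]; omega
    rw [PySem.List.pyRange_one_cons hlt]
    simp only [List.foldl_cons]
    have hb : pvBubble (acc ++ x :: rest) ((acc.length : Int) - 1)
        = (pvIns x acc.reverse).reverse ++ rest := by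
      have := pvBubble_eq_pvIns acc.reverse x rest
      simpa using this
    rw [hb]
    have hlen : ((pvIns x acc.reverse).reverse.length : Int) = (acc.length : Int) + 1 := by
      simp [pvIns_length]
    have hne : (pvIns x acc.reverse).reverse ≠ [] := by
      intro hc
      have := congrArg List.length hc
      simp [pvIns_length] at this
    have := ih ((pvIns x acc.reverse).reverse) hne
    rw [hlen] at this
    have hcast : (acc.length : Int) + 1 + (rest.length : Int) = (acc.length : Int) + ((x :: rest).length : Int) := by
      simp; ring
    rw [hcast] at this
    rw [this]

lemma flush_sort_eq_fold (hand board : List String) :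
    flush_sort hand board
    = (PySem.List.sorted (board ++ hand) (fun s => s) false).foldl
        (fun ac x => (pvIns x ac.reverse).reverse) [] := by
  unfold flush_sort
  cases hl : PySem.List.sorted (board ++ hand) (fun s => s) false with
  | nil => simp [PySem.List.len, PySem.List.pyRange]
  | cons h t =>
    simp only [PySem.List.len_eq]
    have hstep := pvLoop_eq_fold t [h] (by simp)
    norm_num at hstep
    have hb : ((h :: t).length : Int) = 1 + (t.length : Int) := by push_cast [List.length_cons]; ring
    rw [hb, hstep]
    simp [pvIns]

-- semantic facts about the guard and the key
lemma pvKey_lt_of_guard {x a : String} (hx : x.toList ≠ []) (ha : a.toList ≠ [])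
    (h : pvGuard x a) : pvKey x < pvKey a := by
  obtain ⟨cx, tx, hxl⟩ := List.exists_cons_of_ne_nil hx
  obtain ⟨ca, ta, hal⟩ := List.exists_cons_of_ne_nil ha
  have hgx : PySem.Str.pyGet? x 0 = some cx := by
    rw [show (0 : Int) = ((0 : Nat) : Int) from rfl, PySem.Str.pyGet?_natCast, hxl]; rfl
  have hga : PySem.Str.pyGet? a 0 = some ca := by
    rw [show (0 : Int) = ((0 : Nat) : Int) from rfl, PySem.Str.pyGet?_natCast, hal]; rfl
  have hsuit : pvSuit x = pvSuit a := by
    have := h.2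
    rw [hgx, hga] at this
    simp only [pvSuit, hgx, hga, Option.getD_some]
    simpa using this
  rw [pvKey, pvKey, Prod.Lex.lt_iff]
  left
  show toLex (pvSuit x, -pvRank x) < toLex (pvSuit a, -pvRank a)
  rw [Prod.Lex.lt_iff]
  right
  exact ⟨hsuit, show -pvRank x < -pvRank a from neg_lt_neg h.1⟩

lemma pvKey_le_of_not_guard {x a : String} (hx : x.toList ≠ []) (ha : a.toList ≠ [])
    (h : ¬ pvGuard x a) (hle : a ≤ x) : pvKey a ≤ pvKey x := by
  obtain ⟨cx, tx, hxl⟩ := List.exists_cons_of_ne_nil hx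
  obtain ⟨ca, ta, hal⟩ := List.exists_cons_of_ne_nil ha
  have hgx : PySem.Str.pyGet? x 0 = some cx := by
    rw [show (0 : Int) = ((0 : Nat) : Int) from rfl, PySem.Str.pyGet?_natCast, hxl]; rfl
  have hga : PySem.Str.pyGet? a 0 = some ca := by
    rw [show (0 : Int) = ((0 : Nat) : Int) from rfl, PySem.Str.pyGet?_natCast, hal]; rfl
  have hsx : pvSuit x = cx := by unfold pvSuit; rw [hgx]; rfl
  have hsa : pvSuit a = ca := by unfold pvSuit; rw [hga]; rfl
  rw [pvKey, pvKey, Prod.Lex.le_iff]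
  by_cases hcc : ca = cx
  · have hopt : (PySem.Str.pyGet? x 0 == PySem.Str.pyGet? a 0) = true := by
      rw [hgx, hga, hcc]; simp
    have hrk : ¬ pvRank a < pvRank x := fun hr => h ⟨hr, hopt⟩
    rcases lt_or_eq_of_le (not_lt.mp hrk) with hlt | heq
    · left
      show toLex (pvSuit a, -pvRank a) < toLex (pvSuit x, -pvRank x)
      rw [Prod.Lex.lt_iff]
      right
      exact ⟨show pvSuit a = pvSuit x by rw [hsx, hsa, hcc], show -pvRank a < -pvRank x by omega⟩
    · right
      refine ⟨?_, hle⟩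
      show toLex (pvSuit a, -pvRank a) = toLex (pvSuit x, -pvRank x)
      rw [hsx, hsa, hcc, heq]
  · left
    show toLex (pvSuit a, -pvRank a) < toLex (pvSuit x, -pvRank x)
    rw [Prod.Lex.lt_iff]
    left
    show pvSuit a < pvSuit x
    rw [hsx, hsa]
    have hll : a.toList ≤ x.toList := String.le_iff_toList_le.mp hle
    rw [hal, hxl] at hll
    rcases lt_or_eq_of_le hll with hlt | heq
    · rcases List.cons_lt_cons_iff.mp hlt with h1 | h2
      · exact h1
      · exact absurd h2.1 hcc
    · exact absurd (by injection heq) hcc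

lemma pvIns_sorted {x : String} {rL : List String} (hx : x.toList ≠ []) (hne : ∀ a ∈ rL, a.toList ≠ [])
    (hs : rL.Pairwise (fun a b => pvKey b ≤ pvKey a)) (hle : ∀ a ∈ rL, a ≤ x) :
    (pvIns x rL).Pairwise (fun a b => pvKey b ≤ pvKey a) := by
  induction rL with
  | nil => simp [pvIns]
  | cons a rL ih =>
    rw [List.pairwise_cons] at hs
    simp only [pvIns]
    split
    · rename_i hg
      rw [List.pairwise_cons]
      constructor
      · intro b hb
        rcases pvIns_mem hb with rfl | hbm
        · exact le_of_lt (pvKey_lt_of_guard hx (hne a (by simp)) hg)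
        · exact hs.1 b hbm
      · exact ih (fun c hc => hne c (by simp [hc])) hs.2 (fun c hc => hle c (by simp [hc]))
    · rename_i hg
      rw [List.pairwise_cons]
      constructor
      · intro b hb
        have hax : pvKey a ≤ pvKey x :=
          pvKey_le_of_not_guard hx (hne a (by simp)) hg (hle a (by simp))
        rcases List.mem_cons.mp hb with rfl | hbm
        · exact hax
        · exact le_trans (hs.1 b hbm) hax
      · exact List.Pairwise.cons hs.1 hs.2

lemma fold_sorted : ∀ (rest acc : List String),
    (∀ s ∈ acc ++ rest, s.toList ≠ []) →
    acc.Pairwise (fun a b => pvKey a ≤ pvKey b) →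
    (∀ a ∈ acc, ∀ x ∈ rest, a ≤ x) →
    rest.Pairwise (fun a b => a ≤ b) →
    (rest.foldl (fun ac x => (pvIns x ac.reverse).reverse) acc).Pairwise (fun a b => pvKey a ≤ pvKey b)
    ∧ (rest.foldl (fun ac x => (pvIns x ac.reverse).reverse) acc).Perm (acc ++ rest) := by
  intro rest
  induction rest with
  | nil =>
    intro acc hne hp _ _
    simpa using hp
  | cons x rest ih =>
    intro acc hne hp hle hrest
    rw [List.pairwise_cons] at hrest
    simp only [List.foldl_cons]
    have hinsp : (pvIns x acc.reverse).Perm (x :: acc.reverse) := pvIns_perm x acc.reverse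
    have haccp : ((pvIns x acc.reverse).reverse).Perm (x :: acc) := by
      refine (List.reverse_perm _).trans ?_
      exact hinsp.trans (by simpa using (List.reverse_perm acc).cons x)
    have hmem : ∀ c ∈ (pvIns x acc.reverse).reverse, c = x ∨ c ∈ acc := by
      intro c hc
      have := haccp.mem_iff.mp hc
      simpa using this
    have hins : ((pvIns x acc.reverse).reverse).Pairwise (fun a b => pvKey a ≤ pvKey b) := by
      rw [← List.pairwise_reverse] at hp ⊢
      simp only [List.reverse_reverse]
      exact pvIns_sorted (hne x (by simp))
        (fun c hc => hne c (by simp only [List.mem_reverse] at hc; simp [hc]))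
        hp (fun c hc => hle c (by simpa using hc) x (by simp))
    have h1 := ih ((pvIns x acc.reverse).reverse)
      (by
        intro s hs
        simp only [List.mem_append] at hs
        rcases hs with hs | hs
        · rcases hmem s hs with rfl | hs2
          · exact hne s (by simp)
          · exact hne s (by simp [hs2])
        · exact hne s (by simp [hs]))
      hins
      (by
        intro c hc y hy
        rcases hmem c hc with rfl | hc2
        · exact hrest.1 y hy
        · exact hle c (by simp [hc2]) y (by simp [hy]))
      hrest.2
    refine ⟨h1.1, ?_⟩
    refine h1.2.trans ((haccp.append_right rest).trans ?_)
    rw [List.cons_append]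
    exact List.perm_middle.symm

lemma pvKey_injective : Function.Injective pvKey := by
  intro a b h
  have h' := congrArg ofLex h
  simp only [pvKey, ofLex_toLex, Prod.mk.injEq] at h'
  exact h'.2

lemma pre_nonempty {hand board : List String}
    (hpre : ∀ s ∈ board ++ hand, (PySem.Int.ofStr? (PySem.Str.slice s (some 1) none)).isSome = true) :
    ∀ s ∈ board ++ hand, s.toList ≠ [] := by
  intro s hs hnil
  have hse : s = "" := by
    have := congrArg String.ofList hnil
    simpa using this
  have := hpre s hs
  rw [hse] at this
  exact absurd this (by decide)

lemma flush_sort_short (hand board : List String) (h : (board ++ hand).length < 2) :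
    flush_sort hand board = board ++ hand := by
  have hls : (board ++ hand) = [] ∨ ∃ x, (board ++ hand) = [x] := by
    cases hc : board ++ hand with
    | nil => exact Or.inl rfl
    | cons x t =>
      cases t with
      | nil => exact Or.inr ⟨x, rfl⟩
      | cons y u => rw [hc] at h; simp at h
  unfold flush_sort
  rcases hls with hc | ⟨x, hc⟩ <;> rw [hc]
  · have hs : PySem.List.sorted ([] : List String) (fun s => s) false = [] := by
      apply PySem.List.sorted_eq_self_of_pairwise
      simp
    rw [hs]
    rfl
  · have hs : PySem.List.sorted [x] (fun s => s) false = [x] := by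
      apply PySem.List.sorted_eq_self_of_pairwise
      simp
    rw [hs]
    rfl

-- ===== VERDICT (by name: the statement is the Claim_ definition above) =====
theorem flush_sort_spec : Claim_equal_flush_sort := by
  intro hand board _hdom hpre
  unfold Spec_flush_sort
  by_cases hlen : (board ++ hand).length < 2
  · rw [flush_sort_short hand board hlen]
    simp only [flush_sort_alt]
    rw [if_pos hlen]
  · have hall : ∀ s ∈ board ++ hand, (PySem.Int.ofStr? (PySem.Str.slice s (some 1) none)).isSome = true := by
      rcases hpre with hp | hp
      · omega
      · exact hp
    have halt : flush_sort_alt hand board = PySem.List.sorted (board ++ hand) pvKey false := by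
      simp only [flush_sort_alt]
      rw [if_neg hlen]
    rw [halt]
    have hnil := pre_nonempty hall
    set l := board ++ hand with hldef
    set l0 := PySem.List.sorted l (fun s => s) false with hl0
    have hperm0 : l0.Perm l := PySem.List.sorted_perm l (fun s => s) false
    have hnil0 : ∀ s ∈ l0, s.toList ≠ [] := fun s hsm => hnil s (hperm0.mem_iff.mp hsm)
    have hpair0 : l0.Pairwise (fun a b => a ≤ b) := by
      have := PySem.List.sorted_pairwise l (fun s => s)
      simpa using this
    have hfold := fold_sorted l0 [] (by simpa using hnil0) (by simp) (by simp) hpair0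
    rw [flush_sort_eq_fold]
    have hBperm : (PySem.List.sorted l pvKey false).Perm l := PySem.List.sorted_perm l pvKey false
    have hBpair : (PySem.List.sorted l pvKey false).Pairwise (fun a b => pvKey a ≤ pvKey b) :=
      PySem.List.sorted_pairwise l pvKey
    refine PySem.List.eq_of_perm_of_pairwise_le_of_injective pvKey pvKey_injective ?_ hfold.1 hBpair
    refine (hfold.2.trans ?_).trans hBperm.symm
    simpa using hperm0
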